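-- pv_equiv track=rewrite | github.com/qoocrab/project-algorithm-programmers | level_0/JJH/20230908/A 강조하기.py | solution
-- ===== SOURCE A (Python) =====
-- def solution(myString):
--     answer = ''
--     for i in myString:
--         if i.isalpha():
--             if i == 'a':
--                 answer = answer + 'A'
--             else:
--                 if i != 'A':
--                     answer = answer + i.lower()
--                 else:
--                     answer = answer + i
--         else:
--             answer = answer + i.lower()
--
--     return answer
-- ===== SOURCE B (Python) =====
-- def solution(myString):
--     # Two whole-string library passes: lowercase everything (folding 'A' into 'a'),
--     # then promote every 'a' back to 'A'.
--     return myString.lower().replace('a', 'A')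
-- ===== Notes on version B (the rewrite author's own statement) =====
-- stated objective: simpler
-- what changed: Replaces A's character-by-character loop with nested conditionals by two sequential whole-string library transforms: lowercase everything, then promote the letter a back to uppercase.
import Mathlib
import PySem

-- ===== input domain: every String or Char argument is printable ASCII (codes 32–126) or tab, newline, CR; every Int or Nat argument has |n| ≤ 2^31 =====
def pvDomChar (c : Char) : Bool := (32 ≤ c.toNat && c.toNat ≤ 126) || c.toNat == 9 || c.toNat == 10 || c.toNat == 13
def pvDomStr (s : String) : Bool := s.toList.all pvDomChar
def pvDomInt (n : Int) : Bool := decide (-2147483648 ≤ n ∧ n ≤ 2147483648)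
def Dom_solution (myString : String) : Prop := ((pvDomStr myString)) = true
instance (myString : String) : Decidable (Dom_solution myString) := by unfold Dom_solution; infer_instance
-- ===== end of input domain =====

-- B replaces A's per-character conditional accumulation by two whole-string passes
-- (lower() then replace('a','A')); objective: simpler.

-- ===== PORT A =====
-- the 'for i in myString' loop with its 'answer' accumulator, branch for branch
def solutionLoop (cs : List Char) (answer : List Char) : List Char :=
  match cs with
  | [] => answer
  | i :: rest =>
      solutionLoop rest
        (if PySem.Chars.isalpha i then
           (if i = 'a' then answer ++ ['A']
            else if i ≠ 'A' then answer ++ [PySem.Chars.lowerChar i]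
            else answer ++ [i])
         else answer ++ [PySem.Chars.lowerChar i])

def solution (myString : String) : String :=
  String.ofList (solutionLoop myString.toList [])

-- ===== PORT B =====
def solution_alt (myString : String) : String :=
  PySem.Str.replace (PySem.Str.lower myString) "a" "A"

-- ===== PRECONDITION & SPEC =====
def Spec_solution (myString : String) (out : String) : Prop := out = solution_alt myString
instance (myString : String) (out : String) : Decidable (Spec_solution myString out) := by unfold Spec_solution; infer_instance

-- ===== CLAIM (what is proved, stated in full; the proofs are below) =====
def Claim_equal_solution : Prop := ∀ (myString : String), Dom_solution myString → Spec_solution myString (solution myString)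

-- ===== LEMMAS AND PROOFS =====

-- A's per-character transformation
def fA (c : Char) : Char :=
  if PySem.Chars.isalpha c then
    (if c = 'a' then 'A' else if c ≠ 'A' then PySem.Chars.lowerChar c else c)
  else PySem.Chars.lowerChar c

lemma loop_eq (cs : List Char) (acc : List Char) :
    solutionLoop cs acc = acc ++ cs.map fA := by
  induction cs generalizing acc with
  | nil => simp [solutionLoop]
  | cons c t ih =>
      simp only [solutionLoop, List.map_cons, ih, fA]
      split_ifs <;> simp

-- replace.go with the single-char pattern 'a' → 'A' is a pointwise map (fuel ≥ length)
lemma go_single (l : List Char) (acc : List Char) (fuel : Nat) (h : l.length ≤ fuel) :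
    PySem.Chars.replace.go ['a'] ['A'] fuel l acc =
      acc.reverse ++ l.map (fun c => if c = 'a' then 'A' else c) := by
  induction l generalizing fuel acc with
  | nil => cases fuel <;> simp [PySem.Chars.replace.go]
  | cons c t ih =>
      cases fuel with
      | zero => simp at h
      | succ n =>
        rw [PySem.Chars.replace.go]
        by_cases hc : c = 'a'
        · subst hc
          have hp : List.isPrefixOf ['a'] ('a' :: t) = true := by simp [List.isPrefixOf]
          rw [if_pos hp]
          have ht : t.length ≤ n := by simpa using h
          have hd : List.drop (['a'] : List Char).length ('a' :: t) = t := by simp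
          simp only [List.length_cons] at hd ⊢
          rw [show List.drop ((([] : List Char)).length + 1) ('a' :: t) = t from by simp,
              ih _ _ ht]
          simp
        · have hp : List.isPrefixOf ['a'] (c :: t) = false := by
            simp [List.isPrefixOf, Ne.symm hc]
          rw [if_neg (by simp [hp])]
          rw [ih _ _ (by simpa using h)]
          simp [hc]

lemma toNat_ofNat_small (n : Nat) (h2 : n < 0xd800) : (Char.ofNat n).toNat = n := by
  unfold Char.ofNat Char.toNat
  rw [dif_pos (Or.inl h2)]
  simp [Char.ofNatAux]

lemma lowerChar_ne_a (c : Char) (ha : c ≠ 'a') (hA : c ≠ 'A') :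
    PySem.Chars.lowerChar c ≠ 'a' := by
  unfold PySem.Chars.lowerChar PySem.Chars.isupper
  split_ifs with h
  · intro he
    have hle : 65 ≤ c.toNat ∧ c.toNat ≤ 90 := by
      rw [Bool.and_eq_true, decide_eq_true_eq, decide_eq_true_eq, Char.le_def, Char.le_def] at h
      unfold Char.toNat
      exact ⟨by exact_mod_cast h.1, by exact_mod_cast h.2⟩
    have h2 := congrArg Char.toNat he
    rw [toNat_ofNat_small _ (by omega)] at h2
    have h65 : c.toNat = 65 := by
      have : ('a' : Char).toNat = 97 := by decide
      omega
    apply hA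
    have h3 := congrArg Char.ofNat h65
    rwa [Char.ofNat_toNat] at h3
  · exact ha

lemma char_eq (c : Char) :
    fA c = (if PySem.Chars.lowerChar c = 'a' then 'A' else PySem.Chars.lowerChar c) := by
  by_cases ha : c = 'a'
  · subst ha; decide
  by_cases hA : c = 'A'
  · subst hA; decide
  rw [if_neg (lowerChar_ne_a c ha hA)]
  unfold fA
  split_ifs <;> rfl

-- ===== VERDICT (by name: the statement is the Claim_ definition above) =====
theorem solution_spec : Claim_equal_solution := by
  intro s _
  unfold Spec_solution solution solution_alt
  rw [loop_eq]
  simp only [PySem.Str.replace, PySem.Str.lower, PySem.Chars.replace, PySem.Chars.lower,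
    String.toList_ofList, show ("a" : String).toList = ['a'] from by decide,
    show ("A" : String).toList = ['A'] from by decide]
  rw [if_neg (by decide)]
  rw [go_single _ _ _ (le_refl _)]
  simp only [List.nil_append, List.map_map, List.reverse_nil]
  congr 1
  apply List.map_congr_left
  intro c _
  exact char_eq c
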